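-- pv_equiv track=rewrite | github.com/DXsmiley/mathbot | mathbot/calculator/texify.py | interleave_from
-- ===== SOURCE A (Python) =====
-- def interleave_from(generator, symbol):
-- 	not_first = False
-- 	for i in generator:
-- 		if not_first:
-- 			yield symbol
-- 		else:
-- 			not_first = True
-- 		yield from i
-- ===== SOURCE B (Python) =====
-- def interleave_from(generator, symbol):
--     # Uniformly prefix every sub-sequence with the separator, then drop the
--     # leading separator.  No flag, no special-casing of the first item.
--     out = []
--     for part in generator:
--         out.append(symbol)
--         out.extend(part)
--     yield from out[1:]
-- ===== Notes on version B (the rewrite author's own statement) =====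
-- stated objective: simpler
-- what changed: B builds the output in one uniform pass that prefixes EVERY sub-sequence with the separator and then strips the leading separator, instead of A's stateful boolean-flag loop that branches per iteration to skip the first separator.
import Mathlib
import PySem

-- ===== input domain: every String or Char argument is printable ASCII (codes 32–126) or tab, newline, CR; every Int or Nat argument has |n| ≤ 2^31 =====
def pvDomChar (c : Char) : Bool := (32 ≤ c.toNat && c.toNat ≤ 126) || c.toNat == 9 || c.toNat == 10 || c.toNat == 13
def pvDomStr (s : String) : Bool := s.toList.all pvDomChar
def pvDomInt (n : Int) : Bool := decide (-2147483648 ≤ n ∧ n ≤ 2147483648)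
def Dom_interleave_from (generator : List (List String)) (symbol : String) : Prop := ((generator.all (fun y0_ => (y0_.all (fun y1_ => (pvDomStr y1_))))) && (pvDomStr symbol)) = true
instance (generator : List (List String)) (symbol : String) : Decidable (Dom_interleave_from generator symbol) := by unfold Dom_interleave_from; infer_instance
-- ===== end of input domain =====

-- B prefixes every sub-sequence with the separator in one uniform pass and strips the leading separator, replacing A's boolean-flag loop; objective: simpler. (Both Pythons are generators; equivalence is about the yielded sequence.)


-- ===== PORT A =====
-- A: loop over generator with boolean flag not_first; yield symbol before every
-- sub-sequence except the first.  State = (not_first, output so far).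
def interleave_from (generator : List (List String)) (symbol : String) : List String :=
  (generator.foldl
    (fun st i => (true, st.2 ++ (if st.1 then [symbol] else []) ++ i))
    (false, [])).2

-- ===== PORT B =====
-- B: one uniform pass appending 'symbol' then the part for EVERY part,
-- then drop the leading separator (out[1:]).
def interleave_from_alt (generator : List (List String)) (symbol : String) : List String :=
  (generator.foldl (fun out part => out ++ (symbol :: part)) []).drop 1

-- ===== PRECONDITION & SPEC =====
def Spec_interleave_from (generator : List (List String)) (symbol : String) (out : List String) : Prop := out = interleave_from_alt generator symbol
instance (generator : List (List String)) (symbol : String) (out : List String) : Decidable (Spec_interleave_from generator symbol out) := by unfold Spec_interleave_from; infer_instance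

-- ===== CLAIM (what is proved, stated in full; the proofs are below) =====
def Claim_equal_interleave_from : Prop := ∀ (generator : List (List String)) (symbol : String), Dom_interleave_from generator symbol → Spec_interleave_from generator symbol (interleave_from generator symbol)

-- ===== LEMMAS AND PROOFS =====
-- Once A's flag is true, its fold appends 'symbol :: i' for each sub-sequence.
theorem interleave_fold_true (symbol : String) (rest : List (List String)) (acc : List String) :
    (rest.foldl (fun (st : Bool × List String) i => (true, st.2 ++ (if st.1 then [symbol] else []) ++ i)) (true, acc)).2
      = acc ++ rest.flatMap (fun i => symbol :: i) := by
  induction rest generalizing acc with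
  | nil => simp
  | cons x xs ih => rw [List.foldl_cons, ih]; simp

-- B's fold appends 'symbol :: part' for each sub-sequence.
theorem alt_fold (symbol : String) (gen : List (List String)) (acc : List String) :
    gen.foldl (fun out part => out ++ (symbol :: part)) acc
      = acc ++ gen.flatMap (fun i => symbol :: i) := by
  induction gen generalizing acc with
  | nil => simp
  | cons x xs ih => rw [List.foldl_cons, ih]; simp

-- ===== VERDICT (by name: the statement is the Claim_ definition above) =====
theorem interleave_from_spec : Claim_equal_interleave_from := by
  intro generator symbol _
  unfold Spec_interleave_from interleave_from interleave_from_alt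
  cases generator with
  | nil => rfl
  | cons first rest =>
      rw [List.foldl_cons, interleave_fold_true, alt_fold]
      simp
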